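-- pv_equiv track=rewrite | github.com/ksprjarvi/Course_statistics-CSV- | kurssin_tulokset_osa3.py | lopullinen_arvosana
-- ===== SOURCE A (Python) =====
-- def lopullinen_arvosana(pisteet: int):
--     pisterajat = [15, 18, 21, 24, 28]
--     if pisteet >= 28:
--         return 5
--     for raja in pisterajat:
--         if pisteet < raja:
--             arvosana = pisterajat.index(raja)
--             return arvosana
-- ===== SOURCE B (Python) =====
-- def lopullinen_arvosana(pisteet: int):
--     return sum(1 for t in [15, 18, 21, 24, 28] if pisteet >= t)
-- ===== Notes on version B (the rewrite author's own statement) =====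
-- stated objective: simpler
-- what changed: Replaces A's early-return search for the first threshold exceeding the score (plus the special >=28 branch and a list.index call) with a single count of thresholds reached.
import Mathlib
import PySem

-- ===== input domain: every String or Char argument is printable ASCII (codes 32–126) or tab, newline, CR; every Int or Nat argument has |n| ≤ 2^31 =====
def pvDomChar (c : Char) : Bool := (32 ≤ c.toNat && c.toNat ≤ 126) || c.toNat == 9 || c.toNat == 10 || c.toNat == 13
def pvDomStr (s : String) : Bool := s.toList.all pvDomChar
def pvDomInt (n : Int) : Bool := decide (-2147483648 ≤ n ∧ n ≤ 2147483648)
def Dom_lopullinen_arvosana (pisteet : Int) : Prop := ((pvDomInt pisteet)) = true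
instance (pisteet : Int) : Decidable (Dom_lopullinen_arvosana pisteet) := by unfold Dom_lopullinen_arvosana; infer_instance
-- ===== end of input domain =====

-- B replaces A's early-return search for the first exceeding threshold (with a special >=28 case)
-- by counting how many thresholds the score has reached (objective: simpler).


-- ===== PORT A =====
-- the for loop: first raja with pisteet < raja returns pisterajat.index(raja); falling off returns none
def pvALoop (pisteet : Int) (pisterajat : List Int) : List Int → Option Int
  | [] => none
  | raja :: rest =>
      if pisteet < raja then PySem.List.index? pisterajat raja
      else pvALoop pisteet pisterajat rest

def lopullinen_arvosana (pisteet : Int) : Int :=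
  let pisterajat : List Int := [15, 18, 21, 24, 28]
  if pisteet ≥ 28 then 5
  else (pvALoop pisteet pisterajat pisterajat).getD 0  -- none is unreachable here (pisteet < 28)

-- ===== PORT B =====
def lopullinen_arvosana_alt (pisteet : Int) : Int :=
  (([15, 18, 21, 24, 28] : List Int).filter (fun t => pisteet ≥ t)).length

-- ===== PRECONDITION & SPEC =====
def Spec_lopullinen_arvosana (pisteet : Int) (out : Int) : Prop := out = lopullinen_arvosana_alt pisteet
instance (pisteet : Int) (out : Int) : Decidable (Spec_lopullinen_arvosana pisteet out) := by unfold Spec_lopullinen_arvosana; infer_instance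

-- ===== CLAIM (what is proved, stated in full; the proofs are below) =====
def Claim_equal_lopullinen_arvosana : Prop := ∀ (pisteet : Int), Dom_lopullinen_arvosana pisteet → Spec_lopullinen_arvosana pisteet (lopullinen_arvosana pisteet)

-- ===== LEMMAS AND PROOFS =====

-- ===== VERDICT (by name: the statement is the Claim_ definition above) =====
theorem lopullinen_arvosana_spec : Claim_equal_lopullinen_arvosana := by
  intro p _
  unfold Spec_lopullinen_arvosana lopullinen_arvosana lopullinen_arvosana_alt
  by_cases h1 : 15 ≤ p <;> by_cases h2 : 18 ≤ p <;> by_cases h3 : 21 ≤ p <;>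
    by_cases h4 : 24 ≤ p <;> by_cases h5 : 28 ≤ p <;>
    simp [h1, h2, h3, h4, h5, pvALoop, PySem.List.index?, List.filter] <;>
    first
      | omega
      | (split_ifs <;> simp_all [List.idxOf?, List.findIdx?, List.findIdx?.go] <;> omega)
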